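-- pv_equiv track=rewrite | github.com/Skylake-dev/aoc | 2024/python/4.py | _diag_rtl_idxs
-- ===== SOURCE A (Python) =====
-- def _diag_rtl_idxs(lines: list[str], backwards=False) -> list[list[tuple[int, int]]]:
--     # helper to compute indexes of right to left diags
--     # same considerations as _diag_ltr_idxs applies
--     # just use a different indexing. The condition this time
--     # is that the sum of the indexes is constant.
--     result: list[list[tuple[int, int]]] = []
--     n: int = len(lines[0])
--     max_idx: int = n - 1
--     for sum in range(2*max_idx + 1):
--         # list all pairs with that sum
--         diag: list[tuple[int, int]] = []
--         # count is the number of elements in this diagonal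
--         count = sum + 1 if sum < n else 2*max_idx-sum + 1
--         for i in range(count):
--             x = i if sum < n else i+(sum-n)+1
--             y = sum-x  # since x+y=sum y is determined like this
--             diag.append((x, y))
--         if backwards:
--             result.append(list(reversed(diag)))
--         else:
--             result.append(diag)
--     return result
-- ===== SOURCE B (Python) =====
-- def _diag_rtl_idxs(lines: list[str], backwards=False) -> list[list[tuple[int, int]]]:
--     # Bucket every cell of the n x n grid by its anti-diagonal key x + y in one
--     # row-major pass, instead of generating index ranges per diagonal.
--     n = len(lines[0])
--     buckets = {}
--     for x in range(n):
--         for y in range(n):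
--             buckets.setdefault(x + y, []).append((x, y))
--     return [list(reversed(buckets.get(s, []))) if backwards else buckets.get(s, [])
--             for s in range(2*n - 1)]
-- ===== Notes on version B (the rewrite author's own statement) =====
-- stated objective: alternative
-- what changed: Instead of generating each anti-diagonal by computing its start index and element count, B scatters every cell (x,y) of the grid into a dict bucket keyed by x+y in one row-major pass and then reads the buckets off in key order.
import Mathlib
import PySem

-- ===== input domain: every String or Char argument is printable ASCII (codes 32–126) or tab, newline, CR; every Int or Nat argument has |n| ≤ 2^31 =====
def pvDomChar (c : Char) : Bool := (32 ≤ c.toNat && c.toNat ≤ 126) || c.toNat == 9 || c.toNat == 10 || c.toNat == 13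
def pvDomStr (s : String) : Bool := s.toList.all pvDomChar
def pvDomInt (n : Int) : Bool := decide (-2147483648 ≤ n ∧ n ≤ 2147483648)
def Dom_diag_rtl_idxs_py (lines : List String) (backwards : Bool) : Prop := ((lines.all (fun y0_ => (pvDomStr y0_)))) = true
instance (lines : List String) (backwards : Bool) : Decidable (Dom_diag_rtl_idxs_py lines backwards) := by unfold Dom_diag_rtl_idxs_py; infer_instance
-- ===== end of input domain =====

-- B replaces A's per-diagonal index-range generation with a single row-major pass
-- scattering every cell (x,y) into a dict bucket keyed by x+y (alternative traversal, same cost).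


-- ===== PORT A =====
def diag_rtl_idxs_py (lines : List String) (backwards : Bool) : List (List (Int × Int)) :=
  match PySem.List.pyGet? lines 0 with
  | none => []      -- lines[0] raises IndexError in Python; excluded by Pre_
  | some l0 =>
    let n : Int := PySem.Str.len l0
    let maxIdx : Int := n - 1
    (PySem.List.pyRange 0 (2*maxIdx + 1) 1).foldl (fun result s =>
      let count : Int := if s < n then s + 1 else 2*maxIdx - s + 1
      let diag : List (Int × Int) :=
        (PySem.List.pyRange 0 count 1).foldl (fun diag i =>
          let x : Int := if s < n then i else i + (s - n) + 1
          let y : Int := s - x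
          diag ++ [(x, y)]) []
      if backwards then result ++ [diag.reverse] else result ++ [diag]) []

-- ===== PORT B =====
def diag_rtl_idxs_py_alt (lines : List String) (backwards : Bool) : List (List (Int × Int)) :=
  match PySem.List.pyGet? lines 0 with
  | none => []      -- lines[0] raises IndexError in Python; excluded by Pre_
  | some l0 =>
    let n : Int := PySem.Str.len l0
    -- buckets.setdefault(x + y, []).append((x, y))  =  modify key (x+y), default [], append (x,y)
    let buckets : PySem.Dict Int (List (Int × Int)) :=
      (PySem.List.pyRange 0 n 1).foldl (fun d x =>
        (PySem.List.pyRange 0 n 1).foldl (fun d y =>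
          d.modify (x + y) [] (fun l => l ++ [(x, y)])) d) PySem.Dict.empty
    (PySem.List.pyRange 0 (2*n - 1) 1).map (fun s =>
      if backwards then (buckets.getD s []).reverse else buckets.getD s [])

-- ===== PRECONDITION & SPEC =====
-- Pre_ excludes only the empty list, on which Python A raises IndexError at lines[0].
def Pre_diag_rtl_idxs_py (lines : List String) (backwards : Bool) : Prop := lines ≠ []
instance (lines : List String) (backwards : Bool) : Decidable (Pre_diag_rtl_idxs_py lines backwards) := by unfold Pre_diag_rtl_idxs_py; infer_instance
def pvWitness_diag_rtl_idxs_py : List String × Bool := (["abc", "def", "ghi"], false)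
def Spec_diag_rtl_idxs_py (lines : List String) (backwards : Bool) (out : List (List (Int × Int))) : Prop := out = diag_rtl_idxs_py_alt lines backwards
instance (lines : List String) (backwards : Bool) (out : List (List (Int × Int))) : Decidable (Spec_diag_rtl_idxs_py lines backwards out) := by unfold Spec_diag_rtl_idxs_py; infer_instance

-- ===== CLAIM (what is proved, stated in full; the proofs are below) =====
def Claim_equal_diag_rtl_idxs_py : Prop := ∀ (lines : List String) (backwards : Bool), Dom_diag_rtl_idxs_py lines backwards → Pre_diag_rtl_idxs_py lines backwards → Spec_diag_rtl_idxs_py lines backwards (diag_rtl_idxs_py lines backwards)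

-- ===== LEMMAS AND PROOFS =====

-- a foldl that appends one element per step is a map
lemma foldl_append_singleton {α β : Type} (f : α → β) (l : List α) (acc : List β) :
    l.foldl (fun a x => a ++ [f x]) acc = acc ++ l.map f := by
  induction l generalizing acc with
  | nil => simp
  | cons h t ih => simp [List.foldl_cons, ih]

-- filter of a Nat range by "x + y = S" keeps the unique solution if it is in range
lemma filter_range_add_eq (N x S : ℕ) :
    (List.range N).filter (fun y => x + y = S) =
      if x ≤ S ∧ S - x < N then [S - x] else [] := by
  induction N with
  | zero => simp
  | succ N ih =>
    rw [List.range_succ, List.filter_append, ih]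
    by_cases h1 : x + N = S
    · have h2 : ¬ (x ≤ S ∧ S - x < N) := by omega
      rw [if_neg h2, List.nil_append]
      have h3 : (List.filter (fun y => decide (x + y = S)) [N]) = [N] := by simp [h1]
      rw [h3, if_pos (show x ≤ S ∧ S - x < N + 1 by omega)]
      have h4 : S - x = N := by omega
      rw [h4]
    · have h3 : (List.filter (fun y => decide (x + y = S)) [N]) = [] := by simp [h1]
      rw [h3, List.append_nil]
      exact if_congr (by omega) rfl rfl

-- scattering the unique in-interval element of each x into a flatMap is a map over the interval
lemma flatMap_ite_interval {α : Type} (f : ℕ → α) (lo hi : ℕ) (N : ℕ) :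
    (List.range N).flatMap (fun x => if lo ≤ x ∧ x < hi then [f x] else []) =
      (List.range' lo (min hi N - lo)).map f := by
  induction N with
  | zero => simp
  | succ N ih =>
    rw [List.range_succ, List.flatMap_append, ih]
    by_cases h : lo ≤ N ∧ N < hi
    · have hmin : min hi (N + 1) - lo = (min hi N - lo) + 1 := by omega
      have hlast : lo + 1 * (min hi N - lo) = N := by omega
      rw [hmin, List.range'_concat, List.map_append, hlast]
      simp [h]
    · have hmin : min hi (N + 1) - lo = min hi N - lo := by omega
      rw [hmin]
      simp [h]

-- the per-diagonal lists agree: A's explicit index range = B's bucket for key S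
lemma diag_eq (N S : ℕ) (hS : S < 2 * N - 1) :
    (PySem.List.pyRange 0 (if (S : Int) < (N : Int) then (S : Int) + 1 else 2*((N : Int) - 1) - (S : Int) + 1) 1).foldl
        (fun diag i =>
          diag ++ [(if (S : Int) < (N : Int) then i else i + ((S : Int) - (N : Int)) + 1,
                    (S : Int) - (if (S : Int) < (N : Int) then i else i + ((S : Int) - (N : Int)) + 1))]) []
      = (List.range N).flatMap (fun x =>
          ((List.range N).filter (fun y => x + y = S)).map (fun y : ℕ => ((x : Int), (y : Int)))) := by
  have hN : 1 ≤ N := by omega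
  have rhs :
      (List.range N).flatMap (fun x =>
          ((List.range N).filter (fun y => x + y = S)).map (fun y : ℕ => ((x : Int), (y : Int))))
        = (List.range' (S + 1 - N) (min (S + 1) N - (S + 1 - N))).map
            (fun x : ℕ => ((x : Int), ((S - x : ℕ) : Int))) := by
    rw [← flatMap_ite_interval (fun x : ℕ => ((x : Int), ((S - x : ℕ) : Int))) (S + 1 - N) (S + 1) N]
    apply List.flatMap_congr
    intro x hx
    rw [filter_range_add_eq]
    have hxN := List.mem_range.mp hx
    by_cases h : x ≤ S ∧ S - x < N
    · rw [if_pos h, if_pos (by omega)]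
      simp
    · rw [if_neg h, if_neg (by omega)]
      simp
  rw [rhs, foldl_append_singleton, List.nil_append, List.range'_eq_map_range, List.map_map]
  by_cases hlt : (S : Int) < (N : Int)
  · have hSN : S < N := by exact_mod_cast hlt
    rw [if_pos hlt, PySem.List.pyRange_one]
    have hcnt : ((S : Int) + 1 - 0).toNat = S + 1 := by omega
    have hlo : S + 1 - N = 0 := by omega
    have hC : min (S + 1) N - 0 = S + 1 := by omega
    rw [hcnt, hlo, hC]
    simp only [List.map_map]
    apply List.map_congr_left
    intro i hi
    have hiS : i < S + 1 := List.mem_range.mp hi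
    simp only [Function.comp_def, if_pos hlt, Prod.mk.injEq]
    constructor <;> omega
  · have hSN : N ≤ S := by
      by_contra h
      exact hlt (by exact_mod_cast (by omega : (S : ℤ) < (N : ℤ)))
    rw [if_neg hlt, PySem.List.pyRange_one]
    have hcnt : (2*((N : Int) - 1) - (S : Int) + 1 - 0).toNat = 2*N - 1 - S := by omega
    have hC : min (S + 1) N - (S + 1 - N) = 2*N - 1 - S := by omega
    rw [hcnt, hC]
    simp only [List.map_map]
    apply List.map_congr_left
    intro i hi
    have hiC : i < 2*N - 1 - S := List.mem_range.mp hi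
    simp only [Function.comp_def, if_neg hlt, Prod.mk.injEq]
    constructor <;> omega

-- B's bucket for key S, extracted from the nested scatter loop
lemma bucket_eq (N S : ℕ) :
    (((PySem.List.pyRange 0 (N : Int) 1).foldl (fun d x =>
        (PySem.List.pyRange 0 (N : Int) 1).foldl (fun d y =>
          d.modify (x + y) [] (fun l => l ++ [(x, y)])) d)
        (PySem.Dict.empty : PySem.Dict Int (List (Int × Int)))).getD (S : Int) [])
      = (List.range N).flatMap (fun x =>
          ((List.range N).filter (fun y => x + y = S)).map
            (fun y : ℕ => ((x : Int), (y : Int)))) := by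
  have hfold :
      ((PySem.List.pyRange 0 (N : Int) 1).foldl (fun d x =>
        (PySem.List.pyRange 0 (N : Int) 1).foldl (fun d y =>
          d.modify (x + y) [] (fun l => l ++ [(x, y)])) d)
        (PySem.Dict.empty : PySem.Dict Int (List (Int × Int))))
      = (((PySem.List.pyRange 0 (N : Int) 1).flatMap (fun x =>
            (PySem.List.pyRange 0 (N : Int) 1).map (fun y => (x + y, (x, y))))).foldl
          (fun d p => d.modify p.1 [] (fun l => l ++ [p.2]))
          (PySem.Dict.empty : PySem.Dict Int (List (Int × Int)))) := by
    rw [List.foldl_flatMap]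
    simp [List.foldl_map]
  rw [hfold, PySem.Dict.getD_foldl_modify_append]
  have hempty : (PySem.Dict.empty : PySem.Dict Int (List (Int × Int))).getD (S : Int) [] = [] := by
    simp [PySem.Dict.empty, PySem.Dict.getD, PySem.Dict.get?]
  rw [hempty, List.nil_append, List.filter_flatMap, List.map_flatMap,
      PySem.List.pyRange_one, List.flatMap_map]
  apply List.flatMap_congr
  intro x _
  simp only [sub_zero, Int.toNat_natCast, List.map_map, List.filter_map,
             Function.comp_def, zero_add]
  congr 1
  apply List.filter_congr
  intro y _
  simp only [← Nat.cast_add, beq_eq_decide, Nat.cast_inj]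

-- ===== VERDICT (by name: the statement is the Claim_ definition above) =====
theorem diag_rtl_idxs_py_spec : Claim_equal_diag_rtl_idxs_py := by
  intro lines backwards _hdom hpre
  unfold Spec_diag_rtl_idxs_py
  cases lines with
  | nil => exact absurd rfl hpre
  | cons l0 tl =>
    have hget : PySem.List.pyGet? (l0 :: tl) (0 : Int) = some l0 := by
      simp [PySem.List.pyGet?, PySem.List.pyIdx?]
    set N : ℕ := l0.toList.length with hNdef
    have hlen : PySem.Str.len l0 = (N : Int) := PySem.Str.len_eq l0
    simp only [diag_rtl_idxs_py, diag_rtl_idxs_py_alt, hget, hlen]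
    have houter : 2*((N : Int) - 1) + 1 = 2*(N : Int) - 1 := by ring
    rw [houter]
    cases backwards with
    | false =>
      simp only [Bool.false_eq_true, if_false]
      rw [foldl_append_singleton, List.nil_append]
      apply List.map_congr_left
      intro s hs
      have hmem := PySem.List.mem_pyRange_one.mp hs
      obtain ⟨hs0, hs1⟩ := hmem
      lift s to ℕ using hs0 with S
      have hSlt : S < 2 * N - 1 := by omega
      rw [bucket_eq N S]
      exact diag_eq N S hSlt
    | true =>
      simp only [if_true]
      rw [foldl_append_singleton, List.nil_append]
      apply List.map_congr_left
      intro s hs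
      have hmem := PySem.List.mem_pyRange_one.mp hs
      obtain ⟨hs0, hs1⟩ := hmem
      lift s to ℕ using hs0 with S
      have hSlt : S < 2 * N - 1 := by omega
      rw [bucket_eq N S]
      exact congrArg List.reverse (diag_eq N S hSlt)
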